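-- pv_equiv track=rewrite | github.com/kmuthusi/ke-public-health-app | ke-public-health-app/server.py | choose_national_picture_alerts
-- ===== SOURCE A (Python) =====
-- def choose_national_picture_alerts(alerts: list[dict], location_matched_alerts: list[dict], limit: int = 12) -> list[dict]:
--     seen = {(item.get("title"), item.get("url"), item.get("sourceFamily")) for item in location_matched_alerts}
--     result = []
--     represented_families = set()
--
--     for alert in alerts:
--         key = (alert.get("title"), alert.get("url"), alert.get("sourceFamily"))
--         family = alert.get("sourceFamily")
--         if key in seen:
--             continue
--         if family not in represented_families:
--             result.append(alert)
--             represented_families.add(family)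
--             seen.add(key)
--         if len(result) >= limit:
--             return result[:limit]
--
--     for alert in alerts:
--         key = (alert.get("title"), alert.get("url"), alert.get("sourceFamily"))
--         if key in seen:
--             continue
--         result.append(alert)
--         seen.add(key)
--         if len(result) >= limit:
--             break
--
--     return result[:limit]
-- ===== SOURCE B (Python) =====
-- def choose_national_picture_alerts(alerts: list[dict], location_matched_alerts: list[dict], limit: int = 12) -> list[dict]:
--     seen = {(item.get("title"), item.get("url"), item.get("sourceFamily")) for item in location_matched_alerts}
--     represented = set()
--     reps = []
--     extras = []
--     for alert in alerts:
--         key = (alert.get("title"), alert.get("url"), alert.get("sourceFamily"))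
--         if key in seen:
--             continue
--         seen.add(key)
--         if key[2] not in represented:
--             represented.add(key[2])
--             reps.append(alert)
--         else:
--             extras.append(alert)
--     if limit <= 0:
--         return []
--     return (reps + extras)[:limit]
-- ===== Notes on version B (the rewrite author's own statement) =====
-- stated objective: simpler
-- what changed: A's two full passes over alerts (representatives first, then a second scan for the remaining deduplicated alerts) are replaced by a single pass that buckets each unseen alert into a representatives list or an extras list and concatenates them at the end, with limit<=0 handled by one explicit check instead of A's mid-loop early returns.
import Mathlib
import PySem

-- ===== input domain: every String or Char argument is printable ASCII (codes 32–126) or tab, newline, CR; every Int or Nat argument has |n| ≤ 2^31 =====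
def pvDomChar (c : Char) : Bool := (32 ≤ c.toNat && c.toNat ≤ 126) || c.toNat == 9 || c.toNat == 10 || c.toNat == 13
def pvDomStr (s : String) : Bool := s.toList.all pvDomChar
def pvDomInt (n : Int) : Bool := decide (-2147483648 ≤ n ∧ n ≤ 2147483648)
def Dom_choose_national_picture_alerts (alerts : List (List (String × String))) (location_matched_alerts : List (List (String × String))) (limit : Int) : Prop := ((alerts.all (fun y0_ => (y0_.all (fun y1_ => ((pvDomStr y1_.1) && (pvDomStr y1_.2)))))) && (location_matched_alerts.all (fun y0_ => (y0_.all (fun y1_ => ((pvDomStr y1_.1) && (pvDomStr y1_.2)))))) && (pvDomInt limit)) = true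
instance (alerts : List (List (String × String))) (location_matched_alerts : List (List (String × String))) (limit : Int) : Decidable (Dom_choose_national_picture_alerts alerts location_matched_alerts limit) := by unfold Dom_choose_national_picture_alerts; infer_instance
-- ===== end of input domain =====

-- B replaces A's two passes over `alerts` by a single pass that buckets representatives and extras at once (objective: simpler, one traversal).

abbrev PvKey := Option String × Option String × Option String

def pvKey (a : List (String × String)) : PvKey :=
  ((PySem.Dict.mk a).get? "title", (PySem.Dict.mk a).get? "url", (PySem.Dict.mk a).get? "sourceFamily")

-- ===== PORT A =====
-- first `for` loop of A: early `return result[:limit]` is the `.inl` case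
def pvLoop1 (limit : Int) :
    List (List (String × String)) → PySem.Set PvKey → List (List (String × String)) → PySem.Set (Option String) →
    (List (List (String × String))) ⊕ (PySem.Set PvKey × List (List (String × String)) × PySem.Set (Option String))
  | [], seen, result, fams => .inr (seen, result, fams)
  | a :: rest, seen, result, fams =>
    let key := pvKey a
    let fam := (PySem.Dict.mk a).get? "sourceFamily"
    if PySem.Set.contains seen key then pvLoop1 limit rest seen result fams
    else
      let isNew := !(PySem.Set.contains fams fam)
      let result' := if isNew then result ++ [a] else result
      let seen' := if isNew then PySem.Set.add seen key else seen
      let fams' := if isNew then PySem.Set.add fams fam else fams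
      if limit ≤ (result'.length : Int) then .inl (PySem.List.slice result' none (some limit))
      else pvLoop1 limit rest seen' result' fams'

-- second `for` loop of A (with its `break` at limit)
def pvLoop2 (limit : Int) :
    List (List (String × String)) → PySem.Set PvKey → List (List (String × String)) → List (List (String × String))
  | [], _, result => result
  | a :: rest, seen, result =>
    let key := pvKey a
    if PySem.Set.contains seen key then pvLoop2 limit rest seen result
    else
      let result' := result ++ [a]
      if limit ≤ (result'.length : Int) then result'
      else pvLoop2 limit rest (PySem.Set.add seen key) result'

def choose_national_picture_alerts (alerts : List (List (String × String))) (location_matched_alerts : List (List (String × String))) (limit : Int) : List (List (String × String)) :=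
  let seen := PySem.Set.ofList (location_matched_alerts.map pvKey)
  match pvLoop1 limit alerts seen [] PySem.Set.empty with
  | .inl r => r
  | .inr (seen', result', _fams) => PySem.List.slice (pvLoop2 limit alerts seen' result') none (some limit)

-- ===== PORT B =====
-- B's single pass: two buckets (representatives / extras), every processed key goes into `seen`
def pvLoopB :
    List (List (String × String)) → PySem.Set PvKey → PySem.Set (Option String) →
    List (List (String × String)) → List (List (String × String)) →
    List (List (String × String)) × List (List (String × String))
  | [], _, _, reps, extras => (reps, extras)
  | a :: rest, seen, fams, reps, extras =>
    let key := pvKey a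
    if PySem.Set.contains seen key then pvLoopB rest seen fams reps extras
    else
      let seen' := PySem.Set.add seen key
      if PySem.Set.contains fams key.2.2 then pvLoopB rest seen' fams reps (extras ++ [a])
      else pvLoopB rest seen' (PySem.Set.add fams key.2.2) (reps ++ [a]) extras

def choose_national_picture_alerts_alt (alerts : List (List (String × String))) (location_matched_alerts : List (List (String × String))) (limit : Int) : List (List (String × String)) :=
  let seen := PySem.Set.ofList (location_matched_alerts.map pvKey)
  let p := pvLoopB alerts seen PySem.Set.empty [] []
  if limit ≤ 0 then [] else PySem.List.slice (p.1 ++ p.2) none (some limit)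

-- ===== PRECONDITION & SPEC =====
def Spec_choose_national_picture_alerts (alerts : List (List (String × String))) (location_matched_alerts : List (List (String × String))) (limit : Int) (out : List (List (String × String))) : Prop := out = choose_national_picture_alerts_alt alerts location_matched_alerts limit
instance (alerts : List (List (String × String))) (location_matched_alerts : List (List (String × String))) (limit : Int) (out : List (List (String × String))) : Decidable (Spec_choose_national_picture_alerts alerts location_matched_alerts limit out) := by unfold Spec_choose_national_picture_alerts; infer_instance

-- ===== CLAIM (what is proved, stated in full; the proofs are below) =====
def Claim_equal_choose_national_picture_alerts : Prop := ∀ (alerts : List (List (String × String))) (location_matched_alerts : List (List (String × String))) (limit : Int), Dom_choose_national_picture_alerts alerts location_matched_alerts limit → Spec_choose_national_picture_alerts alerts location_matched_alerts limit (choose_national_picture_alerts alerts location_matched_alerts limit)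

-- ===== LEMMAS AND PROOFS =====

-- limit-free version of A's first loop (proof device)
def pvPass1 :
    List (List (String × String)) → PySem.Set PvKey → List (List (String × String)) → PySem.Set (Option String) →
    PySem.Set PvKey × List (List (String × String)) × PySem.Set (Option String)
  | [], seen, result, fams => (seen, result, fams)
  | a :: rest, seen, result, fams =>
    if PySem.Set.contains seen (pvKey a) then pvPass1 rest seen result fams
    else if PySem.Set.contains fams (pvKey a).2.2 then pvPass1 rest seen result fams
    else pvPass1 rest (PySem.Set.add seen (pvKey a)) (result ++ [a]) (PySem.Set.add fams (pvKey a).2.2)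

-- limit-free version of A's second loop (proof device)
def pvPass2 :
    List (List (String × String)) → PySem.Set PvKey → List (List (String × String)) → List (List (String × String))
  | [], _, result => result
  | a :: rest, seen, result =>
    if PySem.Set.contains seen (pvKey a) then pvPass2 rest seen result
    else pvPass2 rest (PySem.Set.add seen (pvKey a)) (result ++ [a])

lemma pvPass1_extends : ∀ (alerts : List (List (String × String))) seen res fams,
    ∃ t, (pvPass1 alerts seen res fams).2.1 = res ++ t := by
  intro alerts
  induction alerts with
  | nil => exact fun seen res fams => ⟨[], by simp [pvPass1]⟩
  | cons a rest ih =>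
    intro seen res fams
    simp only [pvPass1]
    split_ifs with h1 h2
    · exact ih seen res fams
    · exact ih seen res fams
    · obtain ⟨t, ht⟩ := ih (PySem.Set.add seen (pvKey a)) (res ++ [a]) (PySem.Set.add fams (pvKey a).2.2)
      exact ⟨a :: t, by simp [ht]⟩

lemma pvPass2_extends : ∀ (alerts : List (List (String × String))) seen res,
    ∃ t, pvPass2 alerts seen res = res ++ t := by
  intro alerts
  induction alerts with
  | nil => exact fun seen res => ⟨[], by simp [pvPass2]⟩
  | cons a rest ih =>
    intro seen res
    simp only [pvPass2]
    split_ifs with h1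
    · exact ih seen res
    · obtain ⟨t, ht⟩ := ih (PySem.Set.add seen (pvKey a)) (res ++ [a])
      exact ⟨a :: t, by simp [ht]⟩

lemma pvPass1_seen_mono : ∀ (alerts : List (List (String × String))) seen res fams k,
    k ∈ seen → k ∈ (pvPass1 alerts seen res fams).1 := by
  intro alerts
  induction alerts with
  | nil => intro seen res fams k hk; simpa [pvPass1] using hk
  | cons a rest ih =>
    intro seen res fams k hk
    simp only [pvPass1]
    split_ifs with h1 h2
    · exact ih _ _ _ _ hk
    · exact ih _ _ _ _ hk
    · exact ih _ _ _ _ (by simp [PySem.Set.mem_add, hk])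

lemma pvPass1_seen_new : ∀ (alerts : List (List (String × String))) seen res fams (k : PvKey),
    k ∈ (pvPass1 alerts seen res fams).1 → k ∈ seen ∨ PySem.Set.contains fams k.2.2 = false := by
  intro alerts
  induction alerts with
  | nil => intro seen res fams k hk; left; simpa [pvPass1] using hk
  | cons a rest ih =>
    intro seen res fams k hk
    simp only [pvPass1] at hk
    split_ifs at hk with h1 h2
    · exact ih _ _ _ _ hk
    · exact ih _ _ _ _ hk
    · rcases ih _ _ _ _ hk with h | h
      · rw [PySem.Set.mem_add] at h
        rcases h with h | h
        · exact Or.inl h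
        · subst h
          right
          simpa using h2
      · right
        simp only [Bool.eq_false_iff, ne_eq, PySem.Set.contains_iff, PySem.Set.mem_add,
          not_or] at h ⊢
        exact h.1

lemma pvSliceTake (xs : List (List (String × String))) (limit : Int) (h : 0 ≤ limit) :
    PySem.List.slice xs none (some limit) = xs.take limit.toNat := by
  have hl : limit = ((limit.toNat : Nat) : Int) := by omega
  rw [hl, PySem.List.slice_to_natCast]
  simp
  omega

lemma pvSliceShortNonpos (xs : List (List (String × String))) (limit : Int)
    (hx : xs.length ≤ 1) (h : limit ≤ 0) : PySem.List.slice xs none (some limit) = [] := by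
  rcases eq_or_lt_of_le h with h0 | hneg
  · rw [h0, pvSliceTake xs 0 le_rfl]; simp
  · have hk : limit = -(((-limit).toNat : Nat) : Int) := by omega
    rw [hk, PySem.List.slice_to_neg_natCast _ _ (by omega)]
    have : xs.length - (-limit).toNat = 0 := by omega
    simp [this]

lemma pvKeySnd (a : List (String × String)) :
    (pvKey a).2.2 = (PySem.Dict.mk a).get? "sourceFamily" := rfl

lemma pvLoop1_char (limit : Int) (hpos : 0 < limit) :
    ∀ (alerts : List (List (String × String))) seen res fams, (res.length : Int) < limit →
      pvLoop1 limit alerts seen res fams =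
        (if limit ≤ ((pvPass1 alerts seen res fams).2.1.length : Int)
         then .inl ((pvPass1 alerts seen res fams).2.1.take limit.toNat)
         else .inr (pvPass1 alerts seen res fams)) := by
  intro alerts
  induction alerts with
  | nil =>
    intro seen res fams hlt
    simp only [pvLoop1, pvPass1]
    rw [if_neg (by omega)]
  | cons a rest ih =>
    intro seen res fams hlt
    by_cases h1 : PySem.Set.contains seen (pvKey a) = true
    · have e1 : pvLoop1 limit (a :: rest) seen res fams = pvLoop1 limit rest seen res fams := by
        simp only [pvLoop1]; rw [if_pos h1]
      have e2 : pvPass1 (a :: rest) seen res fams = pvPass1 rest seen res fams := by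
        simp only [pvPass1]; rw [if_pos h1]
      rw [e1, e2]; exact ih seen res fams hlt
    · by_cases h2 : PySem.Set.contains fams ((PySem.Dict.mk a).get? "sourceFamily") = true
      · have e1 : pvLoop1 limit (a :: rest) seen res fams = pvLoop1 limit rest seen res fams := by
          simp only [pvLoop1]
          rw [if_neg h1]
          simp only [h2, Bool.not_true]
          simp only [if_false, Bool.false_eq_true]
          rw [if_neg (by omega)]
        have e2 : pvPass1 (a :: rest) seen res fams = pvPass1 rest seen res fams := by
          simp only [pvPass1]
          rw [if_neg h1, if_pos (by rw [pvKeySnd]; exact h2)]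
        rw [e1, e2]; exact ih seen res fams hlt
      · have e2 : pvPass1 (a :: rest) seen res fams
            = pvPass1 rest (PySem.Set.add seen (pvKey a)) (res ++ [a])
                (PySem.Set.add fams (pvKey a).2.2) := by
          simp only [pvPass1]
          rw [if_neg h1, if_neg (by rw [pvKeySnd]; exact h2)]
        have hb2 : PySem.Set.contains fams ((PySem.Dict.mk a).get? "sourceFamily") = false := by
          simpa using h2
        by_cases h3 : limit ≤ ((res ++ [a]).length : Int)
        · have hlen : res.length + 1 = limit.toNat := by
            simp only [List.length_append, List.length_cons, List.length_nil] at h3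
            omega
          have e1 : pvLoop1 limit (a :: rest) seen res fams
              = .inl (PySem.List.slice (res ++ [a]) none (some limit)) := by
            simp only [pvLoop1]
            rw [if_neg h1]
            simp only [hb2, Bool.not_false, if_true]
            rw [if_pos h3]
          obtain ⟨t, ht⟩ := pvPass1_extends rest (PySem.Set.add seen (pvKey a)) (res ++ [a])
            (PySem.Set.add fams (pvKey a).2.2)
          rw [e1, e2, ht]
          rw [if_pos (by simp; omega)]
          rw [List.take_append_of_le_length (by simp; omega)]
          rw [List.take_of_length_le (by simp; omega)]
          rw [pvSliceTake _ _ (by omega)]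
          rw [List.take_of_length_le (by simp; omega)]
        · have e1 : pvLoop1 limit (a :: rest) seen res fams
              = pvLoop1 limit rest (PySem.Set.add seen (pvKey a)) (res ++ [a])
                  (PySem.Set.add fams ((PySem.Dict.mk a).get? "sourceFamily")) := by
            simp only [pvLoop1]
            rw [if_neg h1]
            simp only [hb2, Bool.not_false, if_true]
            rw [if_neg h3]
          rw [e1, e2, pvKeySnd]
          exact ih _ _ _ (by simp at h3 ⊢; omega)

lemma pvLoop2_char (limit : Int) (hpos : 0 < limit) :
    ∀ (alerts : List (List (String × String))) seen res, (res.length : Int) < limit →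
      PySem.List.slice (pvLoop2 limit alerts seen res) none (some limit) =
        (pvPass2 alerts seen res).take limit.toNat := by
  intro alerts
  induction alerts with
  | nil =>
    intro seen res hlt
    simp only [pvLoop2, pvPass2]
    exact pvSliceTake _ _ (by omega)
  | cons a rest ih =>
    intro seen res hlt
    by_cases h1 : PySem.Set.contains seen (pvKey a) = true
    · have e1 : pvLoop2 limit (a :: rest) seen res = pvLoop2 limit rest seen res := by
        simp only [pvLoop2]; rw [if_pos h1]
      have e2 : pvPass2 (a :: rest) seen res = pvPass2 rest seen res := by
        simp only [pvPass2]; rw [if_pos h1]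
      rw [e1, e2]; exact ih seen res hlt
    · have e2 : pvPass2 (a :: rest) seen res
          = pvPass2 rest (PySem.Set.add seen (pvKey a)) (res ++ [a]) := by
        simp only [pvPass2]; rw [if_neg h1]
      by_cases h3 : limit ≤ ((res ++ [a]).length : Int)
      · have e1 : pvLoop2 limit (a :: rest) seen res = res ++ [a] := by
          simp only [pvLoop2]; rw [if_neg h1, if_pos h3]
        obtain ⟨t, ht⟩ := pvPass2_extends rest (PySem.Set.add seen (pvKey a)) (res ++ [a])
        have hlen : res.length + 1 = limit.toNat := by
          simp only [List.length_append, List.length_cons, List.length_nil] at h3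
          omega
        rw [e1, e2, ht, pvSliceTake _ _ (by omega)]
        rw [List.take_of_length_le (by simp; omega)]
        rw [List.take_append_of_le_length (by simp; omega)]
        rw [List.take_of_length_le (by simp; omega)]
      · have e1 : pvLoop2 limit (a :: rest) seen res
            = pvLoop2 limit rest (PySem.Set.add seen (pvKey a)) (res ++ [a]) := by
          simp only [pvLoop2]; rw [if_neg h1, if_neg h3]
        rw [e1, e2]
        exact ih _ _ (by simp at h3 ⊢; omega)

lemma pvContainsAdd {s s' : PySem.Set PvKey} (x : PvKey)
    (h : ∀ k, PySem.Set.contains s k = PySem.Set.contains s' k) (k : PvKey) :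
    PySem.Set.contains (PySem.Set.add s x) k = PySem.Set.contains (PySem.Set.add s' x) k := by
  have hb : ∀ (t t' : Bool), (t = true ↔ t' = true) → t = t' := by decide
  apply hb
  rw [PySem.Set.contains_iff, PySem.Set.contains_iff, PySem.Set.mem_add, PySem.Set.mem_add,
      ← PySem.Set.contains_iff, ← PySem.Set.contains_iff, h k]

lemma pvLoopB_ext : ∀ (alerts : List (List (String × String))) s s' fams reps extras,
    (∀ k : PvKey, PySem.Set.contains s k = PySem.Set.contains s' k) →
    pvLoopB alerts s fams reps extras = pvLoopB alerts s' fams reps extras := by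
  intro alerts
  induction alerts with
  | nil => intro s s' fams reps extras _; rfl
  | cons a rest ih =>
    intro s s' fams reps extras h
    simp only [pvLoopB]
    rw [h (pvKey a)]
    split_ifs with hc hf
    · exact ih _ _ _ _ _ h
    · exact ih _ _ _ _ _ (pvContainsAdd (pvKey a) h)
    · exact ih _ _ _ _ _ (pvContainsAdd (pvKey a) h)

lemma pvContainsTrue {α : Type} [BEq α] [LawfulBEq α] {s : PySem.Set α} {x : α}
    (h : x ∈ s) : PySem.Set.contains s x = true := (PySem.Set.contains_iff _ _).mpr h

lemma pvContainsFalse {α : Type} [BEq α] [LawfulBEq α] {s : PySem.Set α} {x : α}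
    (h : x ∉ s) : PySem.Set.contains s x = false := by
  rw [Bool.eq_false_iff, ne_eq, PySem.Set.contains_iff]; exact h

lemma pvMain : ∀ (alerts : List (List (String × String))) (seenA : PySem.Set PvKey)
    (fams : PySem.Set (Option String)) (res : List (List (String × String)))
    (E : List PvKey) (extras : List (List (String × String))),
    (∀ k ∈ E, PySem.Set.contains fams k.2.2 = true) →
    (∀ k ∈ E, k ∉ seenA) →
    pvPass2 alerts (PySem.Set.update (pvPass1 alerts seenA res fams).1 E)
        ((pvPass1 alerts seenA res fams).2.1 ++ extras)
      = (pvLoopB alerts (PySem.Set.update seenA E) fams res extras).1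
          ++ (pvLoopB alerts (PySem.Set.update seenA E) fams res extras).2 := by
  intro alerts
  induction alerts with
  | nil => intro seenA fams res E extras _ _; simp [pvPass1, pvPass2, pvLoopB]
  | cons a rest ih =>
    intro seenA fams res E extras hF hS
    by_cases hU : PySem.Set.contains (PySem.Set.update seenA E) (pvKey a) = true
    · -- key already seen on B's side: everybody skips
      have hmemU : pvKey a ∈ seenA ∨ pvKey a ∈ E := by
        rw [PySem.Set.contains_iff, PySem.Set.mem_update] at hU; exact hU
      have e1 : pvPass1 (a :: rest) seenA res fams = pvPass1 rest seenA res fams := by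
        rcases hmemU with hm | hm
        · simp only [pvPass1]; rw [if_pos (pvContainsTrue hm)]
        · simp only [pvPass1]
          rw [if_neg (by rw [pvContainsFalse (hS _ hm)]; simp), if_pos (hF _ hm)]
      have hkeyIn : pvKey a ∈ (pvPass1 rest seenA res fams).1 ∨ pvKey a ∈ E := by
        rcases hmemU with hm | hm
        · exact Or.inl (pvPass1_seen_mono rest seenA res fams _ hm)
        · exact Or.inr hm
      have e2 : pvPass2 (a :: rest)
            (PySem.Set.update (pvPass1 rest seenA res fams).1 E)
            ((pvPass1 rest seenA res fams).2.1 ++ extras)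
          = pvPass2 rest (PySem.Set.update (pvPass1 rest seenA res fams).1 E)
              ((pvPass1 rest seenA res fams).2.1 ++ extras) := by
        simp only [pvPass2]
        rw [if_pos (pvContainsTrue (((PySem.Set.mem_update _ _ _).mpr hkeyIn)))]
      have e3 : pvLoopB (a :: rest) (PySem.Set.update seenA E) fams res extras
          = pvLoopB rest (PySem.Set.update seenA E) fams res extras := by
        simp only [pvLoopB]; rw [if_pos hU]
      rw [e1, e2, e3]
      exact ih seenA fams res E extras hF hS
    · have hnm : pvKey a ∉ seenA ∧ pvKey a ∉ E := by
        rw [Bool.not_eq_true, Bool.eq_false_iff, ne_eq, PySem.Set.contains_iff,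
          PySem.Set.mem_update] at hU
        tauto
      have hcA : PySem.Set.contains seenA (pvKey a) = false := pvContainsFalse hnm.1
      by_cases hf : PySem.Set.contains fams (pvKey a).2.2 = true
      · -- extra bucket
        have e1 : pvPass1 (a :: rest) seenA res fams = pvPass1 rest seenA res fams := by
          simp only [pvPass1]; rw [if_neg (by rw [hcA]; simp), if_pos hf]
        have hkeyNot : pvKey a ∉ (pvPass1 rest seenA res fams).1 := by
          intro hm
          rcases pvPass1_seen_new rest seenA res fams _ hm with h | h
          · exact hnm.1 h
          · rw [hf] at h; cases h
        have e2 : pvPass2 (a :: rest)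
              (PySem.Set.update (pvPass1 rest seenA res fams).1 E)
              ((pvPass1 rest seenA res fams).2.1 ++ extras)
            = pvPass2 rest
                (PySem.Set.update (pvPass1 rest seenA res fams).1 (E ++ [pvKey a]))
                ((pvPass1 rest seenA res fams).2.1 ++ (extras ++ [a])) := by
          simp only [pvPass2]
          rw [if_neg (by
            rw [pvContainsFalse (by
              rw [PySem.Set.mem_update]
              rintro (hm | hm)
              · exact hkeyNot hm
              · exact hnm.2 hm)]
            simp)]
          rw [PySem.Set.update_append, PySem.Set.update_cons, PySem.Set.update_nil,
            List.append_assoc]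
        have e3 : pvLoopB (a :: rest) (PySem.Set.update seenA E) fams res extras
            = pvLoopB rest (PySem.Set.update seenA (E ++ [pvKey a])) fams res
                (extras ++ [a]) := by
          simp only [pvLoopB]
          rw [if_neg hU, if_pos hf,
            PySem.Set.update_append, PySem.Set.update_cons, PySem.Set.update_nil]
        rw [e1, e2, e3]
        refine ih seenA fams res (E ++ [pvKey a]) (extras ++ [a]) ?_ ?_
        · intro k hk
          rcases List.mem_append.mp hk with hk | hk
          · exact hF k hk
          · simp at hk; subst hk; exact hf
        · intro k hk
          rcases List.mem_append.mp hk with hk | hk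
          · exact hS k hk
          · simp at hk; subst hk; exact hnm.1
      · -- representative bucket
        have hfb : PySem.Set.contains fams (pvKey a).2.2 = false := by simpa using hf
        have e1 : pvPass1 (a :: rest) seenA res fams
            = pvPass1 rest (PySem.Set.add seenA (pvKey a)) (res ++ [a])
                (PySem.Set.add fams (pvKey a).2.2) := by
          simp only [pvPass1]; rw [if_neg (by rw [hcA]; simp), if_neg (by rw [hfb]; simp)]
        have hkeyIn : pvKey a ∈ (pvPass1 rest (PySem.Set.add seenA (pvKey a)) (res ++ [a])
            (PySem.Set.add fams (pvKey a).2.2)).1 :=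
          pvPass1_seen_mono _ _ _ _ _ (((PySem.Set.mem_add _ _ _).mpr (Or.inr rfl)))
        have e2 : pvPass2 (a :: rest)
              (PySem.Set.update (pvPass1 rest (PySem.Set.add seenA (pvKey a)) (res ++ [a])
                (PySem.Set.add fams (pvKey a).2.2)).1 E)
              ((pvPass1 rest (PySem.Set.add seenA (pvKey a)) (res ++ [a])
                (PySem.Set.add fams (pvKey a).2.2)).2.1 ++ extras)
            = pvPass2 rest
                (PySem.Set.update (pvPass1 rest (PySem.Set.add seenA (pvKey a)) (res ++ [a])
                  (PySem.Set.add fams (pvKey a).2.2)).1 E)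
                ((pvPass1 rest (PySem.Set.add seenA (pvKey a)) (res ++ [a])
                  (PySem.Set.add fams (pvKey a).2.2)).2.1 ++ extras) := by
          simp only [pvPass2]
          rw [if_pos (pvContainsTrue (((PySem.Set.mem_update _ _ _).mpr (Or.inl hkeyIn))))]
        have e3 : pvLoopB (a :: rest) (PySem.Set.update seenA E) fams res extras
            = pvLoopB rest (PySem.Set.add (PySem.Set.update seenA E) (pvKey a))
                (PySem.Set.add fams (pvKey a).2.2) (res ++ [a]) extras := by
          simp only [pvLoopB]
          rw [if_neg hU, if_neg (by rw [hfb]; simp)]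
        have e4 : pvLoopB rest (PySem.Set.add (PySem.Set.update seenA E) (pvKey a))
              (PySem.Set.add fams (pvKey a).2.2) (res ++ [a]) extras
            = pvLoopB rest (PySem.Set.update (PySem.Set.add seenA (pvKey a)) E)
                (PySem.Set.add fams (pvKey a).2.2) (res ++ [a]) extras := by
          apply pvLoopB_ext
          intro k
          have hb : ∀ (t t' : Bool), (t = true ↔ t' = true) → t = t' := by decide
          apply hb
          rw [PySem.Set.contains_iff, PySem.Set.contains_iff, PySem.Set.mem_add,
            PySem.Set.mem_update, PySem.Set.mem_update, PySem.Set.mem_add]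
          tauto
        rw [e1, e2, e3, e4]
        refine ih (PySem.Set.add seenA (pvKey a)) (PySem.Set.add fams (pvKey a).2.2)
          (res ++ [a]) E extras ?_ ?_
        · intro k hk
          exact pvContainsTrue (((PySem.Set.mem_add _ _ _).mpr (Or.inl ((PySem.Set.contains_iff _ _).mp (hF k hk)))))
        · intro k hk hm
          rcases (PySem.Set.mem_add _ _ _).mp hm with hm | hm
          · exact hS k hk hm
          · subst hm; exact hnm.2 hk

lemma pvLoop1_nonpos (limit : Int) (hnp : limit ≤ 0) :
    ∀ (alerts : List (List (String × String))) seen,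
      pvLoop1 limit alerts seen [] PySem.Set.empty = .inl [] ∨
      ∃ s, pvLoop1 limit alerts seen [] PySem.Set.empty = .inr (s, [], PySem.Set.empty) := by
  intro alerts
  induction alerts with
  | nil => intro seen; exact Or.inr ⟨seen, rfl⟩
  | cons a rest ih =>
    intro seen
    by_cases h1 : PySem.Set.contains seen (pvKey a) = true
    · have e : pvLoop1 limit (a :: rest) seen [] PySem.Set.empty
          = pvLoop1 limit rest seen [] PySem.Set.empty := by
        simp only [pvLoop1]; rw [if_pos h1]
      rw [e]; exact ih seen
    · left
      have hfe : PySem.Set.contains (PySem.Set.empty : PySem.Set (Option String))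
          ((PySem.Dict.mk a).get? "sourceFamily") = false :=
        pvContainsFalse (by simp [PySem.Set.empty])
      simp only [pvLoop1]
      rw [if_neg h1]
      simp only [hfe, Bool.not_false, if_true]
      rw [if_pos (by simp; omega)]
      rw [pvSliceShortNonpos _ _ (by simp) hnp]

lemma pvLoop2_nonpos (limit : Int) (hnp : limit ≤ 0) :
    ∀ (alerts : List (List (String × String))) seen,
      PySem.List.slice (pvLoop2 limit alerts seen []) none (some limit) = [] := by
  intro alerts
  induction alerts with
  | nil =>
    intro seen
    simp only [pvLoop2]
    exact pvSliceShortNonpos _ _ (by simp) hnp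
  | cons a rest ih =>
    intro seen
    by_cases h1 : PySem.Set.contains seen (pvKey a) = true
    · have e : pvLoop2 limit (a :: rest) seen [] = pvLoop2 limit rest seen [] := by
        simp only [pvLoop2]; rw [if_pos h1]
      rw [e]; exact ih seen
    · have e : pvLoop2 limit (a :: rest) seen [] = [] ++ [a] := by
        simp only [pvLoop2]; rw [if_neg h1, if_pos (by simp; omega)]
      rw [e]
      exact pvSliceShortNonpos _ _ (by simp) hnp

-- ===== VERDICT (by name: the statement is the Claim_ definition above) =====
theorem choose_national_picture_alerts_spec : Claim_equal_choose_national_picture_alerts := by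
  intro alerts lma limit _hdom
  unfold Spec_choose_national_picture_alerts
  simp only [choose_national_picture_alerts, choose_national_picture_alerts_alt]
  by_cases hnp : limit ≤ 0
  · rw [if_pos hnp]
    rcases pvLoop1_nonpos limit hnp alerts (PySem.Set.ofList (lma.map pvKey)) with h | ⟨s1, h⟩
    · rw [h]
    · rw [h]
      exact pvLoop2_nonpos limit hnp alerts s1
  · have hpos : 0 < limit := by omega
    rw [if_neg hnp]
    have hB := pvMain alerts (PySem.Set.ofList (lma.map pvKey)) PySem.Set.empty [] [] []
      (by intro k hk; cases hk) (by intro k hk; cases hk)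
    simp only [PySem.Set.update_nil, List.append_nil] at hB
    rw [pvLoop1_char limit hpos alerts (PySem.Set.ofList (lma.map pvKey)) [] PySem.Set.empty
      (by simpa using hpos)]
    rcases hP : pvPass1 alerts (PySem.Set.ofList (lma.map pvKey)) [] PySem.Set.empty
      with ⟨s1, r1, f1⟩
    rw [hP] at hB
    dsimp only at hB ⊢
    by_cases hL : limit ≤ ((r1.length : Nat) : Int)
    · rw [if_pos hL]
      dsimp only
      obtain ⟨t, ht⟩ := pvPass2_extends alerts s1 r1
      rw [pvSliceTake _ _ (by omega), ← hB, ht]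
      rw [List.take_append_of_le_length (by omega)]
    · rw [if_neg hL]
      dsimp only
      rw [pvLoop2_char limit hpos alerts s1 r1 (by omega)]
      rw [pvSliceTake _ _ (by omega), hB]
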